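-- pv_equiv track=rewrite | github.com/martin-merener/algorithms | quick_union.py | quick_union
-- ===== SOURCE A (Python) =====
-- def root(p, I):
-- 	r = p
-- 	while I[r]!=r:
-- 		r = I[r]
-- 	return r
--
-- def quick_union(n, pairs):
-- 	'''
-- 	given n nodes, and a set of pairs between the nodes, quick_union returns the connected components of the graph
-- 	'''
-- 	I = list(range(n))
-- 	for p in pairs:
-- 		r_0 = root(p[0],I)
-- 		r_1 = root(p[1],I)
-- 		if r_0!=r_1:
-- 			I[r_0] = r_1
-- 	R = [root(j,I) for j in I]
-- 	return R
-- ===== SOURCE B (Python) =====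
-- def quick_union(n, pairs):
--     '''
--     given n nodes, and a set of pairs between the nodes, quick_union returns the connected components of the graph
--     '''
--     parent = list(range(n))
--
--     def find(x):
--         r = x
--         while parent[r] != r:
--             r = parent[r]
--         # path compression: point every node on the path straight at the root
--         while parent[x] != r:
--             parent[x], x = r, parent[x]
--         return r
--
--     for a, b in pairs:
--         ra = find(a)
--         rb = find(b)
--         if ra != rb:
--             parent[ra] = rb
--     return [find(j) for j in range(n)]
-- ===== Notes on version B (the rewrite author's own statement) =====
-- stated objective: alternative
-- what changed: B keeps A's union rule but adds two-pass path compression inside find (during the union loop and the output pass), flattening parent chains as they are traversed instead of re-walking them from scratch on every root call.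
import Mathlib
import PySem

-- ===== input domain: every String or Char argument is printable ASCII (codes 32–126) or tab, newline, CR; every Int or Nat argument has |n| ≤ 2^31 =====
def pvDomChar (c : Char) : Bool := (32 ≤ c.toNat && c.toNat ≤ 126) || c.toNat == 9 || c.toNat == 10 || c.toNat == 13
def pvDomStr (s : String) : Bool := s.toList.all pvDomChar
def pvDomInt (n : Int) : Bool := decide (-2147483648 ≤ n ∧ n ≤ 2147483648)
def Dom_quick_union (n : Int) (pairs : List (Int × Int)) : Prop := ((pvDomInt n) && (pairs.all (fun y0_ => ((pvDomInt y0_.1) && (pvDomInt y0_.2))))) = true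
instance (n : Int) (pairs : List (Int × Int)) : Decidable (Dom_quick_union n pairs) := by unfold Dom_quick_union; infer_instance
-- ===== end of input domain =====

-- B keeps A's union rule but adds two-pass path compression in find (objective:
-- alternative algorithm; not measured faster on the benchmark inputs); same return
-- value, neither version mutates its arguments.

-- ===== PORT A =====
-- Python indexing I[r] (possibly negative, in range under Pre_)
def pvGetI (l : List Int) (i : Int) : Int := PySem.List.pyGetD l i 0

-- root(p, I): while I[r] != r: r = I[r].  Fuel pairs.length + 1 always suffices
-- under Pre_ (tree depth never exceeds the number of unions performed).
def pvRootA : Nat → Int → List Int → Int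
  | 0, r, _ => r
  | f + 1, r, I => if pvGetI I r = r then r else pvRootA f (pvGetI I r) I

-- body of the for-loop: union the roots of the pair's endpoints
def pvStepA (F : Nat) (I : List Int) (p : Int × Int) : List Int :=
  let r0 := pvRootA F p.1 I
  let r1 := pvRootA F p.2 I
  if r0 ≠ r1 then PySem.List.pySetD I r0 r1 else I

def quick_union (n : Int) (pairs : List (Int × Int)) : List Int :=
  let F := pairs.length + 1
  let I := pairs.foldl (pvStepA F) (PySem.List.pyRange 0 n 1)
  I.map (fun j => pvRootA F j I)

-- ===== PORT B =====
-- first while of find: chase parents to the root (no writes)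
def pvFindLoop : Nat → Int → List Int → Int
  | 0, r, _ => r
  | f + 1, r, P => if pvGetI P r = r then r else pvFindLoop f (pvGetI P r) P

-- second while of find: while parent[x] != r: parent[x], x = r, parent[x]
def pvCompress : Nat → Int → Int → List Int → List Int
  | 0, _, _, P => P
  | f + 1, x, r, P =>
      if pvGetI P x = r then P else pvCompress f (pvGetI P x) r (PySem.List.pySetD P x r)

-- find(x): root plus path compression; returns (root, updated parent array)
def pvFind (F : Nat) (x : Int) (P : List Int) : Int × List Int :=
  let r := pvFindLoop F x P
  (r, pvCompress F x r P)

-- body of the for-loop: find both roots (compressing), then union them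
def pvStepB (F : Nat) (P : List Int) (p : Int × Int) : List Int :=
  let fa := pvFind F p.1 P
  let fb := pvFind F p.2 fa.2
  if fa.1 ≠ fb.1 then PySem.List.pySetD fb.2 fa.1 fb.1 else fb.2

-- body of the output comprehension [find(j) for j in range(n)]
def pvOutB (F : Nat) (s : List Int × List Int) (j : Int) : List Int × List Int :=
  let f := pvFind F j s.2
  (s.1 ++ [f.1], f.2)

def quick_union_alt (n : Int) (pairs : List (Int × Int)) : List Int :=
  let F := pairs.length + 1
  let st := pairs.foldl (pvStepB F) (PySem.List.pyRange 0 n 1)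
  ((PySem.List.pyRange 0 n 1).foldl (pvOutB F) (([] : List Int), st)).1

-- ===== PRECONDITION & SPEC =====
-- Pre_ excludes exactly the inputs on which Python A raises IndexError:
-- some pair component outside [-n, n) (in particular any pair at all when n ≤ 0).
def Pre_quick_union (n : Int) (pairs : List (Int × Int)) : Prop :=
  ∀ p ∈ pairs, (-n ≤ p.1 ∧ p.1 < n) ∧ (-n ≤ p.2 ∧ p.2 < n)
instance (n : Int) (pairs : List (Int × Int)) : Decidable (Pre_quick_union n pairs) := by
  unfold Pre_quick_union; infer_instance

def pvWitness_quick_union : Int × (List (Int × Int)) := (4, [(0, 1), (2, 3), (1, -1)])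

def Spec_quick_union (n : Int) (pairs : List (Int × Int)) (out : List Int) : Prop := out = quick_union_alt n pairs
instance (n : Int) (pairs : List (Int × Int)) (out : List Int) : Decidable (Spec_quick_union n pairs out) := by unfold Spec_quick_union; infer_instance

-- ===== CLAIM (what is proved, stated in full; the proofs are below) =====
def Claim_equal_quick_union : Prop := ∀ (n : Int) (pairs : List (Int × Int)), Dom_quick_union n pairs → Pre_quick_union n pairs → Spec_quick_union n pairs (quick_union n pairs)

-- ===== LEMMAS AND PROOFS =====

-- the two root-chasing loops are the same recursion
theorem pvFindLoop_eq_rootA (f : Nat) (p : Int) (l : List Int) :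
    pvFindLoop f p l = pvRootA f p l := by
  induction f generalizing p with
  | zero => rfl
  | succ f ih => simp only [pvFindLoop, pvRootA, ih]

-- every entry of the parent array is an index of the array
def pvGood (l : List Int) : Prop := ∀ x ∈ l, 0 ≤ x ∧ x < (l.length : Int)

-- d is the distance-to-root function of the parent forest l
def pvDistFn (l : List Int) (d : Int → Nat) : Prop :=
  ∀ i : Int, 0 ≤ i → i < (l.length : Int) →
    (pvGetI l i = i → d i = 0) ∧ (pvGetI l i ≠ i → d i = d (pvGetI l i) + 1)

-- z lies on the parent chain starting at p
inductive pvLeads (l : List Int) : Int → Int → Prop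
  | refl (p : Int) : pvLeads l p p
  | step (p z : Int) : pvLeads l (pvGetI l p) z → pvLeads l p z

-- the chain from p ends at the root ρ
inductive pvReach (l : List Int) : Int → Int → Prop
  | root (r : Int) : pvGetI l r = r → pvReach l r r
  | step (p ρ : Int) : pvGetI l p ≠ p → pvReach l (pvGetI l p) ρ → pvReach l p ρ

theorem pvReach_isRoot {l : List Int} {p ρ : Int} (h : pvReach l p ρ) : pvGetI l ρ = ρ := by
  induction h with
  | root r h => exact h
  | step p ρ h₁ h₂ ih => exact ih

theorem pvReach_det {l : List Int} {p ρ₁ ρ₂ : Int}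
    (h₁ : pvReach l p ρ₁) (h₂ : pvReach l p ρ₂) : ρ₁ = ρ₂ := by
  induction h₁ generalizing ρ₂ with
  | root r h =>
    cases h₂ with
    | root _ _ => rfl
    | step _ _ hne _ => exact absurd h hne
  | step p ρ hne h ih =>
    cases h₂ with
    | root _ h' => exact absurd h' hne
    | step _ _ _ h' => exact ih h'

theorem pvGet_range {l : List Int} {p : Int} (hg : pvGood l)
    (h₁ : -(l.length : Int) ≤ p) (h₂ : p < (l.length : Int)) :
    0 ≤ pvGetI l p ∧ pvGetI l p < (l.length : Int) := by
  exact hg _ (PySem.List.pyGetD_mem l 0 ⟨h₁, h₂⟩)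

theorem pvReach_range {l : List Int} {p ρ : Int} (hg : pvGood l)
    (h₁ : 0 ≤ p) (h₂ : p < (l.length : Int)) (h : pvReach l p ρ) :
    0 ≤ ρ ∧ ρ < (l.length : Int) := by
  induction h with
  | root r h => exact ⟨h₁, h₂⟩
  | step p ρ hne h ih =>
    have := pvGet_range hg (by omega) (by omega) (p := p)
    exact ih this.1 this.2

-- negative in-range indices read/write/reach exactly as their wrapped counterpart
theorem pvGet_neg {l : List Int} {p : Int} (h₁ : -(l.length : Int) ≤ p) (h₂ : p < 0) :
    pvGetI l p = pvGetI l (p + l.length) := by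
  simp only [pvGetI, PySem.List.pyGetD, PySem.List.pyGet?, PySem.List.pyIdx?]
  have hh : ¬ 0 ≤ p := by omega
  have h3 : 0 ≤ p + (l.length : Int) := by omega
  have h4 : p + (l.length : Int) < (l.length : Int) := by omega
  simp only [hh, if_false, if_pos h₁, if_pos h3, if_pos h4]
  have h5 : l.length - (-p).toNat = (p + (l.length : Int)).toNat := by omega
  rw [h5]

theorem pvSet_neg {l : List Int} {p : Int} (v : Int)
    (h₁ : -(l.length : Int) ≤ p) (h₂ : p < 0) :
    PySem.List.pySetD l p v = PySem.List.pySetD l (p + l.length) v := by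
  simp only [PySem.List.pySetD, PySem.List.pySet?, PySem.List.pyIdx?]
  have hh : ¬ 0 ≤ p := by omega
  have h3 : 0 ≤ p + (l.length : Int) := by omega
  have h4 : p + (l.length : Int) < (l.length : Int) := by omega
  simp only [hh, if_false, if_pos h₁, if_pos h3, if_pos h4]
  have h5 : l.length - (-p).toNat = (p + (l.length : Int)).toNat := by omega
  rw [h5]

theorem pvReach_neg {l : List Int} {p ρ : Int} (hg : pvGood l)
    (h₁ : -(l.length : Int) ≤ p) (h₂ : p < 0) :
    (pvReach l p ρ ↔ pvReach l (p + l.length) ρ) := by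
  have hget := pvGet_neg h₁ h₂
  have hr := pvGet_range hg h₁ (by omega)
  have hne : pvGetI l p ≠ p := by have := hr.1; omega
  constructor
  · intro h
    cases h with
    | root _ h => exact absurd h hne
    | step _ _ _ h =>
      rw [hget] at h
      by_cases hq : pvGetI l (p + l.length) = p + l.length
      · rwa [hq] at h
      · exact pvReach.step _ _ hq h
  · intro h
    refine pvReach.step _ _ hne ?_
    rw [hget]
    cases h with
    | root _ h => rw [h]; exact pvReach.root _ h
    | step _ _ hne' h => exact h

-- reading / writing at a nonnegative index
theorem pvGet_set {l : List Int} {x : Int} (v j : Int)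
    (hx0 : 0 ≤ x) (hx1 : x < (l.length : Int)) (hj : 0 ≤ j) :
    pvGetI (PySem.List.pySetD l x v) j = if j = x then v else pvGetI l j := by
  have hx : x = ((x.toNat : Nat) : Int) := by omega
  have hj' : j = ((j.toNat : Nat) : Int) := by omega
  rw [pvGetI, hx, hj',
    PySem.List.pyGetD_pySetD_natCast l x.toNat j.toNat v 0 (by omega)]
  by_cases h : j = x
  · have h1 : j.toNat = x.toNat := by omega
    have h2 : ((j.toNat : Nat) : Int) = ((x.toNat : Nat) : Int) := by omega
    rw [if_pos h1, if_pos h2]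
  · have h1 : ¬ j.toNat = x.toNat := by omega
    have h2 : ¬ ((j.toNat : Nat) : Int) = ((x.toNat : Nat) : Int) := by omega
    rw [if_neg h1, if_neg h2, pvGetI]

theorem pvLeads_root {l : List Int} {r z : Int} (h : pvLeads l r z) :
    pvGetI l r = r → z = r := by
  induction h with
  | refl p => intro _; rfl
  | step p z h ih => intro hr; exact (ih (by rw [hr]; exact hr)).trans hr

theorem pvLeads_d_mono {l : List Int} {d : Int → Nat} {p z : Int} (hg : pvGood l)
    (hd : pvDistFn l d) (h : pvLeads l p z) (h₁ : 0 ≤ p) (h₂ : p < (l.length : Int)) :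
    d z ≤ d p := by
  induction h with
  | refl p => exact le_refl _
  | step p z h ih =>
    have hq := pvGet_range hg (by omega) h₂ (p := p)
    have := ih hq.1 hq.2
    by_cases hr : pvGetI l p = p
    · rwa [hr] at this
    · have := (hd p h₁ h₂).2 hr
      omega

-- fuel lemma: with fuel > depth, pvRootA reaches the root
theorem pvRootA_spec {l : List Int} {d : Int → Nat} {p : Int} {f : Nat} (hg : pvGood l)
    (hd : pvDistFn l d) (h₁ : 0 ≤ p) (h₂ : p < (l.length : Int)) (hf : d p + 1 ≤ f) :
    pvReach l p (pvRootA f p l) := by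
  induction f generalizing p with
  | zero => omega
  | succ f ih =>
    by_cases hr : pvGetI l p = p
    · simp only [pvRootA, if_pos hr]
      exact pvReach.root _ hr
    · simp only [pvRootA, if_neg hr]
      have hq := pvGet_range hg (by omega) h₂ (p := p)
      have hdq := (hd p h₁ h₂).2 hr
      exact pvReach.step _ _ hr (ih hq.1 hq.2 (by omega))

theorem pvRootA_spec_neg {l : List Int} {d : Int → Nat} {p : Int} {f : Nat} (hg : pvGood l)
    (hd : pvDistFn l d) (h₁ : -(l.length : Int) ≤ p) (h₂ : p < 0)
    (hf : d (p + l.length) + 2 ≤ f) :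
    pvReach l p (pvRootA f p l) := by
  obtain ⟨f, rfl⟩ : ∃ f', f = f' + 1 := ⟨f - 1, by omega⟩
  have hget := pvGet_neg h₁ h₂
  have hq := pvGet_range hg h₁ (by omega)
  have hne : pvGetI l p ≠ p := by have := hq.1; omega
  simp only [pvRootA, if_neg hne]
  refine pvReach.step _ _ hne ?_
  have h3 : 0 ≤ p + (l.length : Int) := by omega
  have h4 : p + (l.length : Int) < (l.length : Int) := by omega
  rw [hget]
  have h5 := pvGet_range hg (p := p + l.length) (by omega) (by omega)
  by_cases hroot : pvGetI l (p + l.length) = p + l.length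
  · exact pvRootA_spec hg hd h5.1 h5.2 (by rw [hroot]; omega)
  · have := (hd _ h3 h4).2 hroot
    exact pvRootA_spec hg hd h5.1 h5.2 (by omega)

-- chain inversions
theorem pvReach_inv {l : List Int} {x ρ : Int} (h : pvReach l x ρ) (hne : pvGetI l x ≠ x) :
    pvReach l (pvGetI l x) ρ := by
  cases h with
  | root _ h => exact absurd h hne
  | step _ _ _ h => exact h

theorem pvLeads_inv {l : List Int} {i x : Int} (h : pvLeads l i x) (hne : i ≠ x) :
    pvLeads l (pvGetI l i) x := by
  cases h with
  | refl _ => exact absurd rfl hne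
  | step _ _ h => exact h

-- redirecting a non-root node x straight to its root r changes no root and
-- shrinks the distance function
theorem pvSet_to_root {l : List Int} {d : Int → Nat} {x r : Int}
    (hg : pvGood l) (hd : pvDistFn l d)
    (hx0 : 0 ≤ x) (hx1 : x < (l.length : Int)) (hre : pvReach l x r)
    (hner : pvGetI l x ≠ r) :
    (PySem.List.pySetD l x r).length = l.length ∧
    pvGood (PySem.List.pySetD l x r) ∧
    (∃ d', pvDistFn (PySem.List.pySetD l x r) d' ∧
      ∀ y : Int, 0 ≤ y → y < (l.length : Int) → d' y ≤ d y) ∧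
    (∀ j ρ : Int, 0 ≤ j → j < (l.length : Int) →
      (pvReach (PySem.List.pySetD l x r) j ρ ↔ pvReach l j ρ)) := by
  classical
  have hrootr : pvGetI l r = r := pvReach_isRoot hre
  have hrrange : 0 ≤ r ∧ r < (l.length : Int) := pvReach_range hg hx0 hx1 hre
  have hxnr : pvGetI l x ≠ x := by
    intro h
    cases hre with
    | root _ _ => exact hner (by rw [h])
    | step _ _ hne _ => exact hne h
  have hrx : r ≠ x := by intro h; rw [h] at hrootr; exact hxnr hrootr
  have hlen : (PySem.List.pySetD l x r).length = l.length := PySem.List.length_pySetD l x r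
  have hget : ∀ j : Int, 0 ≤ j →
      pvGetI (PySem.List.pySetD l x r) j = if j = x then r else pvGetI l j :=
    fun j hj => pvGet_set r j hx0 hx1 hj
  have hdx1 : 1 ≤ d x := by
    have := (hd x hx0 hx1).2 hxnr; omega
  have hgood : pvGood (PySem.List.pySetD l x r) := by
    intro y hy
    rw [hlen]
    rw [PySem.List.pySetD_of_nonneg l r hx0] at hy
    rcases List.mem_or_eq_of_mem_set hy with h | h
    · exact hg y h
    · rw [h]; exact hrrange
  let d' : Int → Nat := fun y => if pvLeads l y x then d y - d x + 1 else d y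
  have hd'pos : ∀ y, pvLeads l y x → d' y = d y - d x + 1 := by
    intro y h; simp only [d', if_pos h]
  have hd'neg : ∀ y, ¬ pvLeads l y x → d' y = d y := by
    intro y h; simp only [d', if_neg h]
  refine ⟨hlen, hgood, ⟨d', ?_, ?_⟩, ?_⟩
  · -- the new distance function
    intro i hi0 hi1
    rw [hlen] at hi1
    have hgi := hget i hi0
    by_cases hix : i = x
    · subst hix
      rw [hgi, if_pos rfl]
      constructor
      · intro h; exact absurd h hrx
      · intro _
        have hLr : ¬ pvLeads l r i := fun h => hrx (pvLeads_root h hrootr).symm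
        rw [hd'pos i (pvLeads.refl i), hd'neg r hLr, (hd r hrrange.1 hrrange.2).1 hrootr]
        omega
    · rw [hgi, if_neg hix]
      constructor
      · intro hroot
        rw [hd'neg i (fun h => hix (pvLeads_root h hroot).symm)]
        exact (hd i hi0 hi1).1 hroot
      · intro hne
        have hq := pvGet_range hg (by omega) hi1 (p := i)
        have hdi := (hd i hi0 hi1).2 hne
        by_cases hL : pvLeads l i x
        · have hLq : pvLeads l (pvGetI l i) x := pvLeads_inv hL hix
          have hmono : d x ≤ d (pvGetI l i) := pvLeads_d_mono hg hd hLq hq.1 hq.2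
          rw [hd'pos i hL, hd'pos _ hLq]
          omega
        · have hLq : ¬ pvLeads l (pvGetI l i) x := fun h => hL (pvLeads.step _ _ h)
          rw [hd'neg i hL, hd'neg _ hLq]
          omega
  · -- it shrinks
    intro y hy0 hy1
    by_cases hL : pvLeads l y x
    · rw [hd'pos y hL]
      have hmono : d x ≤ d y := pvLeads_d_mono hg hd hL hy0 hy1
      omega
    · rw [hd'neg y hL]
  · -- roots are unchanged
    have hrootr' : pvGetI (PySem.List.pySetD l x r) r = r := by
      rw [hget r hrrange.1, if_neg hrx]; exact hrootr
    have fwd : ∀ j ρ : Int, pvReach (PySem.List.pySetD l x r) j ρ →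
        0 ≤ j → j < (l.length : Int) → pvReach l j ρ := by
      intro j ρ h
      induction h with
      | root j hj =>
        intro hj0 _
        rw [hget j hj0] at hj
        by_cases hjx : j = x
        · rw [if_pos hjx] at hj; exact absurd (hj.trans hjx) hrx
        · rw [if_neg hjx] at hj; exact pvReach.root _ hj
      | step j ρ hne h ih =>
        intro hj0 hj1
        rw [hget j hj0] at hne h ih
        by_cases hjx : j = x
        · rw [if_pos hjx] at h
          have : ρ = r := pvReach_det h (pvReach.root _ hrootr')
          rw [hjx, this]; exact hre
        · rw [if_neg hjx] at hne h ih
          have hq := pvGet_range hg (by omega) hj1 (p := j)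
          exact pvReach.step _ _ hne (ih hq.1 hq.2)
    have bwd : ∀ j ρ : Int, pvReach l j ρ →
        0 ≤ j → j < (l.length : Int) → pvReach (PySem.List.pySetD l x r) j ρ := by
      intro j ρ h
      induction h with
      | root j hj =>
        intro hj0 _
        by_cases hjx : j = x
        · exact absurd (hjx ▸ hj) hxnr
        · refine pvReach.root _ ?_
          rw [hget j hj0, if_neg hjx]; exact hj
      | step j ρ hne h ih =>
        intro hj0 hj1
        by_cases hjx : j = x
        · have hρ : ρ = r :=
            pvReach_det (pvReach.step _ _ hne h) (by rw [hjx]; exact hre)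
          refine pvReach.step _ _ ?_ ?_
          · rw [hget j hj0, if_pos hjx]; exact fun hc => hrx (hc.trans hjx)
          · rw [hget j hj0, if_pos hjx, hρ]; exact pvReach.root _ hrootr'
        · have hq := pvGet_range hg (by omega) hj1 (p := j)
          refine pvReach.step _ _ ?_ ?_
          · rw [hget j hj0, if_neg hjx]; exact hne
          · rw [hget j hj0, if_neg hjx]; exact ih hq.1 hq.2
    intro j ρ hj0 hj1
    exact ⟨fun h => fwd j ρ h hj0 hj1, fun h => bwd j ρ h hj0 hj1⟩

-- a full compression pass: roots unchanged, distances only shrink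
theorem pvCompress_spec (f : Nat) : ∀ (l : List Int) (d : Int → Nat) (x r : Int),
    pvGood l → pvDistFn l d → 0 ≤ x → x < (l.length : Int) → pvReach l x r →
    d x + 1 ≤ f →
    (pvCompress f x r l).length = l.length ∧ pvGood (pvCompress f x r l) ∧
    (∃ d', pvDistFn (pvCompress f x r l) d' ∧
      ∀ y : Int, 0 ≤ y → y < (l.length : Int) → d' y ≤ d y) ∧
    (∀ j ρ : Int, 0 ≤ j → j < (l.length : Int) →
      (pvReach (pvCompress f x r l) j ρ ↔ pvReach l j ρ)) := by
  induction f with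
  | zero => intro l d x r _ _ _ _ _ hf; omega
  | succ f ih =>
    intro l d x r hg hd hx0 hx1 hre hf
    by_cases hstop : pvGetI l x = r
    · simp only [pvCompress, if_pos hstop]
      exact ⟨by simp, hg, ⟨d, hd, fun y _ _ => le_refl _⟩, by simp⟩
    · simp only [pvCompress, if_neg hstop]
      obtain ⟨hlen1, hg1, ⟨d1, hd1, hd1le⟩, hiff1⟩ := pvSet_to_root hg hd hx0 hx1 hre hstop
      have hxnr : pvGetI l x ≠ x := by
        intro h
        cases hre with
        | root _ _ => exact hstop h
        | step _ _ hne _ => exact hne h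
      have hq := pvGet_range hg (by omega) hx1 (p := x)
      have hre1 : pvReach l (pvGetI l x) r := pvReach_inv hre hxnr
      have hreL1 : pvReach (PySem.List.pySetD l x r) (pvGetI l x) r :=
        (hiff1 _ r hq.1 hq.2).2 hre1
      have hdix : d x = d (pvGetI l x) + 1 := (hd x hx0 hx1).2 hxnr
      have hd1x1 : d1 (pvGetI l x) ≤ d (pvGetI l x) := hd1le _ hq.1 hq.2
      obtain ⟨hlen2, hg2, ⟨d2, hd2, hd2le⟩, hiff2⟩ :=
        ih (PySem.List.pySetD l x r) d1 (pvGetI l x) r hg1 hd1 hq.1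
          (by rw [hlen1]; exact hq.2) hreL1 (by omega)
      refine ⟨by rw [hlen2, hlen1], hg2, ⟨d2, hd2, ?_⟩, ?_⟩
      · intro y hy0 hy1
        have h1 := hd2le y hy0 (by rw [hlen1]; exact hy1)
        have h2 := hd1le y hy0 hy1
        omega
      · intro j ρ hj0 hj1
        exact (hiff2 j ρ hj0 (by rw [hlen1]; exact hj1)).trans (hiff1 j ρ hj0 hj1)

-- the same for a negative (wrapped) start index
theorem pvCompress_spec_neg (f : Nat) (l : List Int) (d : Int → Nat) (x r : Int)
    (hg : pvGood l) (hd : pvDistFn l d)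
    (hx0 : -(l.length : Int) ≤ x) (hx1 : x < 0) (hre : pvReach l x r)
    (hf : d (x + l.length) + 2 ≤ f) :
    (pvCompress f x r l).length = l.length ∧ pvGood (pvCompress f x r l) ∧
    (∃ d', pvDistFn (pvCompress f x r l) d' ∧
      ∀ y : Int, 0 ≤ y → y < (l.length : Int) → d' y ≤ d y) ∧
    (∀ j ρ : Int, 0 ≤ j → j < (l.length : Int) →
      (pvReach (pvCompress f x r l) j ρ ↔ pvReach l j ρ)) := by
  obtain ⟨f, rfl⟩ : ∃ f', f = f' + 1 := ⟨f - 1, by omega⟩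
  by_cases hstop : pvGetI l x = r
  · simp only [pvCompress, if_pos hstop]
    exact ⟨by simp, hg, ⟨d, hd, fun y _ _ => le_refl _⟩, by simp⟩
  · simp only [pvCompress, if_neg hstop]
    have hget := pvGet_neg hx0 hx1
    have hw0 : 0 ≤ x + (l.length : Int) := by omega
    have hw1 : x + (l.length : Int) < (l.length : Int) := by omega
    have hrew : pvReach l (x + l.length) r := (pvReach_neg hg hx0 hx1).1 hre
    have hstop' : pvGetI l (x + l.length) ≠ r := by rw [← hget]; exact hstop
    rw [pvSet_neg r hx0 hx1, hget]
    obtain ⟨hlen1, hg1, ⟨d1, hd1, hd1le⟩, hiff1⟩ :=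
      pvSet_to_root hg hd hw0 hw1 hrew hstop'
    have hwnr : pvGetI l (x + l.length) ≠ x + l.length := by
      intro h
      cases hrew with
      | root _ _ => exact hstop' h
      | step _ _ hne _ => exact hne h
    have hq := pvGet_range hg (by omega) hw1 (p := x + l.length)
    have hre1 : pvReach l (pvGetI l (x + l.length)) r := pvReach_inv hrew hwnr
    have hreL1 : pvReach (PySem.List.pySetD l (x + l.length) r) (pvGetI l (x + l.length)) r :=
      (hiff1 _ r hq.1 hq.2).2 hre1
    have hdix : d (x + l.length) = d (pvGetI l (x + l.length)) + 1 := (hd _ hw0 hw1).2 hwnr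
    have hd1x1 : d1 (pvGetI l (x + l.length)) ≤ d (pvGetI l (x + l.length)) := hd1le _ hq.1 hq.2
    obtain ⟨hlen2, hg2, ⟨d2, hd2, hd2le⟩, hiff2⟩ :=
      pvCompress_spec f (PySem.List.pySetD l (x + l.length) r) d1 (pvGetI l (x + l.length)) r
        hg1 hd1 hq.1 (by rw [hlen1]; exact hq.2) hreL1 (by omega)
    refine ⟨by rw [hlen2, hlen1], hg2, ⟨d2, hd2, ?_⟩, ?_⟩
    · intro y hy0 hy1
      have h1 := hd2le y hy0 (by rw [hlen1]; exact hy1)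
      have h2 := hd1le y hy0 hy1
      omega
    · intro j ρ hj0 hj1
      exact (hiff2 j ρ hj0 (by rw [hlen1]; exact hj1)).trans (hiff1 j ρ hj0 hj1)

-- linking two distinct roots: every node of r0's tree now reaches r1,
-- every other node keeps its root
theorem pvUnion_spec {l : List Int} {d : Int → Nat} {r0 r1 : Int}
    (hg : pvGood l) (hd : pvDistFn l d)
    (h00 : 0 ≤ r0) (h01 : r0 < (l.length : Int)) (h10 : 0 ≤ r1) (h11 : r1 < (l.length : Int))
    (hr0 : pvGetI l r0 = r0) (hr1 : pvGetI l r1 = r1) (hne : r0 ≠ r1) :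
    (PySem.List.pySetD l r0 r1).length = l.length ∧
    pvGood (PySem.List.pySetD l r0 r1) ∧
    (∃ d', pvDistFn (PySem.List.pySetD l r0 r1) d' ∧
      ∀ y : Int, 0 ≤ y → y < (l.length : Int) → d' y ≤ d y + 1) ∧
    (∀ j ρ : Int, 0 ≤ j → j < (l.length : Int) →
      (pvReach (PySem.List.pySetD l r0 r1) j ρ ↔
        ((pvReach l j r0 ∧ ρ = r1) ∨ (pvReach l j ρ ∧ ρ ≠ r0)))) := by
  classical
  have hlen : (PySem.List.pySetD l r0 r1).length = l.length := PySem.List.length_pySetD l r0 r1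
  have hget : ∀ j : Int, 0 ≤ j →
      pvGetI (PySem.List.pySetD l r0 r1) j = if j = r0 then r1 else pvGetI l j :=
    fun j hj => pvGet_set r1 j h00 h01 hj
  have hr1r0 : r1 ≠ r0 := fun h => hne h.symm
  have hrootr1' : pvGetI (PySem.List.pySetD l r0 r1) r1 = r1 := by
    rw [hget r1 h10, if_neg hr1r0]; exact hr1
  have hgood : pvGood (PySem.List.pySetD l r0 r1) := by
    intro y hy
    rw [hlen]
    rw [PySem.List.pySetD_of_nonneg l r1 h00] at hy
    rcases List.mem_or_eq_of_mem_set hy with h | h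
    · exact hg y h
    · rw [h]; exact ⟨h10, h11⟩
  let d' : Int → Nat := fun y => if pvLeads l y r0 then d y + 1 else d y
  have hd'pos : ∀ y, pvLeads l y r0 → d' y = d y + 1 := by
    intro y h; simp only [d', if_pos h]
  have hd'neg : ∀ y, ¬ pvLeads l y r0 → d' y = d y := by
    intro y h; simp only [d', if_neg h]
  refine ⟨hlen, hgood, ⟨d', ?_, ?_⟩, ?_⟩
  · intro i hi0 hi1
    rw [hlen] at hi1
    have hgi := hget i hi0
    by_cases hix : i = r0
    · subst hix
      rw [hgi, if_pos rfl]
      constructor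
      · intro h; exact absurd h.symm hne
      · intro _
        have hLr : ¬ pvLeads l r1 i := fun h => hr1r0 ((pvLeads_root h hr1).symm ▸ rfl)
        rw [hd'pos i (pvLeads.refl i), hd'neg r1 hLr,
          (hd i hi0 hi1).1 hr0, (hd r1 h10 h11).1 hr1]
    · rw [hgi, if_neg hix]
      constructor
      · intro hroot
        rw [hd'neg i (fun h => hix (pvLeads_root h hroot).symm)]
        exact (hd i hi0 hi1).1 hroot
      · intro hne'
        have hdi := (hd i hi0 hi1).2 hne'
        by_cases hL : pvLeads l i r0
        · have hLq : pvLeads l (pvGetI l i) r0 := pvLeads_inv hL hix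
          rw [hd'pos i hL, hd'pos _ hLq]
          omega
        · have hLq : ¬ pvLeads l (pvGetI l i) r0 := fun h => hL (pvLeads.step _ _ h)
          rw [hd'neg i hL, hd'neg _ hLq]
          omega
  · intro y hy0 hy1
    by_cases hL : pvLeads l y r0
    · rw [hd'pos y hL]
    · rw [hd'neg y hL]; omega
  · have fwd : ∀ j ρ : Int, pvReach (PySem.List.pySetD l r0 r1) j ρ →
        0 ≤ j → j < (l.length : Int) →
        ((pvReach l j r0 ∧ ρ = r1) ∨ (pvReach l j ρ ∧ ρ ≠ r0)) := by
      intro j ρ h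
      induction h with
      | root j hj =>
        intro hj0 _
        rw [hget j hj0] at hj
        by_cases hjx : j = r0
        · rw [if_pos hjx] at hj; exact absurd (hj.trans hjx) hr1r0
        · rw [if_neg hjx] at hj
          exact Or.inr ⟨pvReach.root _ hj, hjx⟩
      | step j ρ hne' h ih =>
        intro hj0 hj1
        rw [hget j hj0] at hne' h ih
        by_cases hjx : j = r0
        · rw [if_pos hjx] at h
          have : ρ = r1 := pvReach_det h (pvReach.root _ hrootr1')
          exact Or.inl ⟨by rw [hjx]; exact pvReach.root _ hr0, this⟩
        · rw [if_neg hjx] at hne' h ih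
          have hq := pvGet_range hg (by omega) hj1 (p := j)
          rcases ih hq.1 hq.2 with ⟨h1, h2⟩ | ⟨h1, h2⟩
          · exact Or.inl ⟨pvReach.step _ _ hne' h1, h2⟩
          · exact Or.inr ⟨pvReach.step _ _ hne' h1, h2⟩
    have bwd1 : ∀ j ρ : Int, pvReach l j ρ → ρ = r0 → 0 ≤ j → j < (l.length : Int) →
        pvReach (PySem.List.pySetD l r0 r1) j r1 := by
      intro j ρ h
      induction h with
      | root j hj =>
        intro hρ hj0 _
        refine pvReach.step _ _ ?_ ?_
        · rw [hget j hj0, if_pos hρ]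
          intro hc; exact hr1r0 (hc.trans hρ)
        · rw [hget j hj0, if_pos hρ]
          exact pvReach.root _ hrootr1'
      | step p z hne' h ih =>
        intro hρ hj0 hj1
        have hjx : p ≠ r0 := by
          intro hc; rw [hc] at hne'; exact hne' hr0
        have hq := pvGet_range hg (by omega) hj1 (p := p)
        refine pvReach.step _ _ ?_ ?_
        · rw [hget p hj0, if_neg hjx]; exact hne'
        · rw [hget p hj0, if_neg hjx]; exact ih hρ hq.1 hq.2
    have bwd2 : ∀ j ρ : Int, pvReach l j ρ → ρ ≠ r0 → 0 ≤ j → j < (l.length : Int) →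
        pvReach (PySem.List.pySetD l r0 r1) j ρ := by
      intro j ρ h
      induction h with
      | root j hj =>
        intro hρ hj0 _
        refine pvReach.root _ ?_
        rw [hget j hj0, if_neg hρ]; exact hj
      | step j ρ hne' h ih =>
        intro hρ hj0 hj1
        by_cases hjx : j = r0
        · have : ρ = r0 := pvReach_det (pvReach.step _ _ hne' h) (by rw [hjx]; exact pvReach.root _ hr0)
          exact absurd this hρ
        · have hq := pvGet_range hg (by omega) hj1 (p := j)
          refine pvReach.step _ _ ?_ ?_
          · rw [hget j hj0, if_neg hjx]; exact hne'
          · rw [hget j hj0, if_neg hjx]; exact ih hρ hq.1 hq.2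
    intro j ρ hj0 hj1
    constructor
    · intro h; exact fwd j ρ h hj0 hj1
    · rintro (⟨h1, h2⟩ | ⟨h1, h2⟩)
      · rw [h2]; exact bwd1 j r0 h1 rfl hj0 hj1
      · exact bwd2 j ρ h1 h2 hj0 hj1

-- wrappers covering both a nonnegative and a negative (wrapped) start index
theorem pvReach_range_any {l : List Int} {p ρ : Int} (hg : pvGood l)
    (h₁ : -(l.length : Int) ≤ p) (h₂ : p < (l.length : Int)) (h : pvReach l p ρ) :
    0 ≤ ρ ∧ ρ < (l.length : Int) := by
  by_cases h0 : 0 ≤ p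
  · exact pvReach_range hg h0 h₂ h
  · have := (pvReach_neg hg h₁ (by omega)).1 h
    exact pvReach_range hg (by omega) (by omega) this

theorem pvRootA_spec_any {l : List Int} {d : Int → Nat} {k f : Nat} {p : Int}
    (hg : pvGood l) (hd : pvDistFn l d)
    (hb : ∀ i : Int, 0 ≤ i → i < (l.length : Int) → d i ≤ k)
    (h₁ : -(l.length : Int) ≤ p) (h₂ : p < (l.length : Int)) (hf : k + 2 ≤ f) :
    pvReach l p (pvRootA f p l) := by
  by_cases h : 0 ≤ p
  · exact pvRootA_spec hg hd h h₂ (by have := hb p h h₂; omega)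
  · exact pvRootA_spec_neg hg hd h₁ (by omega)
      (by have := hb (p + l.length) (by omega) (by omega); omega)

theorem pvCompress_spec_any {f k : Nat} {l : List Int} {d : Int → Nat} {x r : Int}
    (hg : pvGood l) (hd : pvDistFn l d)
    (hb : ∀ i : Int, 0 ≤ i → i < (l.length : Int) → d i ≤ k)
    (hx0 : -(l.length : Int) ≤ x) (hx1 : x < (l.length : Int)) (hre : pvReach l x r)
    (hf : k + 2 ≤ f) :
    (pvCompress f x r l).length = l.length ∧ pvGood (pvCompress f x r l) ∧
    (∃ d', pvDistFn (pvCompress f x r l) d' ∧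
      ∀ y : Int, 0 ≤ y → y < (l.length : Int) → d' y ≤ d y) ∧
    (∀ j ρ : Int, 0 ≤ j → j < (l.length : Int) →
      (pvReach (pvCompress f x r l) j ρ ↔ pvReach l j ρ)) := by
  by_cases h : 0 ≤ x
  · exact pvCompress_spec f l d x r hg hd h hx1 hre (by have := hb x h hx1; omega)
  · exact pvCompress_spec_neg f l d x r hg hd hx0 (by omega) hre
      (by have := hb (x + l.length) (by omega) (by omega); omega)

theorem pvReachIff_ext {l1 l2 : List Int} (hlen : l1.length = l2.length)
    (hg1 : pvGood l1) (hg2 : pvGood l2)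
    (h : ∀ j ρ : Int, 0 ≤ j → j < (l1.length : Int) → (pvReach l1 j ρ ↔ pvReach l2 j ρ)) :
    ∀ j ρ : Int, -(l1.length : Int) ≤ j → j < (l1.length : Int) →
      (pvReach l1 j ρ ↔ pvReach l2 j ρ) := by
  intro j ρ hj0 hj1
  by_cases h0 : 0 ≤ j
  · exact h j ρ h0 hj1
  · have e1 := pvReach_neg hg1 hj0 (by omega) (ρ := ρ)
    have e2 := pvReach_neg hg2 (l := l2) (p := j) (ρ := ρ) (by rw [← hlen]; exact hj0) (by omega)
    have hc : ((l2.length : Int)) = (l1.length : Int) := by rw [hlen]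
    rw [hc] at e2
    exact e1.trans ((h (j + l1.length) ρ (by omega) (by omega)).trans e2.symm)

-- the joint loop invariant: both forests valid, depth ≤ number of unions,
-- identical root assignment
def pvInv (k : Nat) (lA lB : List Int) : Prop :=
  lA.length = lB.length ∧ pvGood lA ∧ pvGood lB ∧
  (∃ d, pvDistFn lA d ∧ ∀ i : Int, 0 ≤ i → i < (lA.length : Int) → d i ≤ k) ∧
  (∃ d, pvDistFn lB d ∧ ∀ i : Int, 0 ≤ i → i < (lB.length : Int) → d i ≤ k) ∧
  (∀ j ρ : Int, 0 ≤ j → j < (lA.length : Int) → (pvReach lA j ρ ↔ pvReach lB j ρ))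

-- one pair processed on both sides preserves the invariant
theorem pvStep_spec (F k : Nat) (lA lB : List Int) (p : Int × Int)
    (hInv : pvInv k lA lB)
    (ha0 : -(lA.length : Int) ≤ p.1) (ha1 : p.1 < (lA.length : Int))
    (hb0 : -(lA.length : Int) ≤ p.2) (hb1 : p.2 < (lA.length : Int))
    (hF : k + 2 ≤ F) :
    (pvStepA F lA p).length = lA.length ∧ pvInv (k + 1) (pvStepA F lA p) (pvStepB F lB p) := by
  obtain ⟨hlen, hgA, hgB, ⟨dA, hdA, hbA⟩, ⟨dB, hdB, hbB⟩, hEq⟩ := hInv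
  have hcl : ((lB.length : Int)) = (lA.length : Int) := by rw [hlen]
  have hrA0 : pvReach lA p.1 (pvRootA F p.1 lA) := pvRootA_spec_any hgA hdA hbA ha0 ha1 hF
  have hrA1 : pvReach lA p.2 (pvRootA F p.2 lA) := pvRootA_spec_any hgA hdA hbA hb0 hb1 hF
  have h0rng := pvReach_range_any hgA ha0 ha1 hrA0
  have h1rng := pvReach_range_any hgA hb0 hb1 hrA1
  have hroot0 := pvReach_isRoot hrA0
  have hroot1 := pvReach_isRoot hrA1
  have hEq' := pvReachIff_ext hlen hgA hgB hEq
  have hrB0 : pvReach lB p.1 (pvRootA F p.1 lB) :=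
    pvRootA_spec_any hgB hdB hbB (by rw [hcl]; exact ha0) (by rw [hcl]; exact ha1) hF
  have hra : pvRootA F p.1 lB = pvRootA F p.1 lA :=
    pvReach_det ((hEq' p.1 _ ha0 ha1).2 hrB0) hrA0
  rw [hra] at hrB0
  obtain ⟨hlenB1, hgB1, ⟨dB1, hdB1, hdB1le⟩, hiffB1⟩ :=
    pvCompress_spec_any (f := F) hgB hdB hbB (by rw [hcl]; exact ha0) (by rw [hcl]; exact ha1)
      hrB0 hF
  have hbB1 : ∀ i : Int, 0 ≤ i →
      i < ((pvCompress F p.1 (pvRootA F p.1 lA) lB).length : Int) → dB1 i ≤ k := by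
    intro i h0 h1
    rw [hlenB1] at h1
    exact le_trans (hdB1le i h0 h1) (hbB i h0 h1)
  have hclB1 : (((pvCompress F p.1 (pvRootA F p.1 lA) lB).length : Int)) = (lA.length : Int) := by
    rw [hlenB1, hcl]
  have hrB1 : pvReach (pvCompress F p.1 (pvRootA F p.1 lA) lB) p.2
      (pvRootA F p.2 (pvCompress F p.1 (pvRootA F p.1 lA) lB)) :=
    pvRootA_spec_any hgB1 hdB1 hbB1 (by rw [hclB1]; exact hb0) (by rw [hclB1]; exact hb1) hF
  have hiffB1' := pvReachIff_ext (l1 := pvCompress F p.1 (pvRootA F p.1 lA) lB) (l2 := lB)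
    hlenB1 hgB1 hgB (by intro j ρ h0 h1; exact hiffB1 j ρ h0 (by rw [hlenB1] at h1; exact h1))
  have hrb : pvRootA F p.2 (pvCompress F p.1 (pvRootA F p.1 lA) lB) = pvRootA F p.2 lA :=
    pvReach_det
      ((hEq' p.2 _ hb0 hb1).2
        ((hiffB1' p.2 _ (by rw [hclB1]; exact hb0) (by rw [hclB1]; exact hb1)).1 hrB1))
      hrA1
  rw [hrb] at hrB1
  obtain ⟨hlenB2, hgB2, ⟨dB2, hdB2, hdB2le⟩, hiffB2⟩ :=
    pvCompress_spec_any (f := F) hgB1 hdB1 hbB1 (by rw [hclB1]; exact hb0)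
      (by rw [hclB1]; exact hb1) hrB1 hF
  have hbB2 : ∀ i : Int, 0 ≤ i →
      i < ((pvCompress F p.2 (pvRootA F p.2 lA)
        (pvCompress F p.1 (pvRootA F p.1 lA) lB)).length : Int) → dB2 i ≤ k := by
    intro i h0 h1
    rw [hlenB2] at h1
    exact le_trans (hdB2le i h0 h1) (hbB1 i h0 h1)
  have hclB2 : (((pvCompress F p.2 (pvRootA F p.2 lA)
      (pvCompress F p.1 (pvRootA F p.1 lA) lB)).length : Int)) = (lA.length : Int) := by
    rw [hlenB2, hclB1]
  have hEq2 : ∀ j ρ : Int, 0 ≤ j → j < (lA.length : Int) →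
      (pvReach lA j ρ ↔
        pvReach (pvCompress F p.2 (pvRootA F p.2 lA)
          (pvCompress F p.1 (pvRootA F p.1 lA) lB)) j ρ) := by
    intro j ρ h0 h1
    refine (hEq j ρ h0 h1).trans ?_
    refine (Iff.symm (hiffB1 j ρ h0 (by rw [hcl]; exact h1))).trans ?_
    exact Iff.symm (hiffB2 j ρ h0 (by rw [hclB1]; exact h1))
  have hroot0B2 : pvGetI (pvCompress F p.2 (pvRootA F p.2 lA)
      (pvCompress F p.1 (pvRootA F p.1 lA) lB)) (pvRootA F p.1 lA) = pvRootA F p.1 lA :=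
    pvReach_isRoot ((hEq2 _ _ h0rng.1 h0rng.2).1 (pvReach.root _ hroot0))
  have hroot1B2 : pvGetI (pvCompress F p.2 (pvRootA F p.2 lA)
      (pvCompress F p.1 (pvRootA F p.1 lA) lB)) (pvRootA F p.2 lA) = pvRootA F p.2 lA :=
    pvReach_isRoot ((hEq2 _ _ h1rng.1 h1rng.2).1 (pvReach.root _ hroot1))
  have hstepA : pvStepA F lA p =
      if pvRootA F p.1 lA ≠ pvRootA F p.2 lA then
        PySem.List.pySetD lA (pvRootA F p.1 lA) (pvRootA F p.2 lA)
      else lA := by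
    simp only [pvStepA]
  have hstepB : pvStepB F lB p =
      if pvRootA F p.1 lA ≠ pvRootA F p.2 lA then
        PySem.List.pySetD
          (pvCompress F p.2 (pvRootA F p.2 lA) (pvCompress F p.1 (pvRootA F p.1 lA) lB))
          (pvRootA F p.1 lA) (pvRootA F p.2 lA)
      else pvCompress F p.2 (pvRootA F p.2 lA) (pvCompress F p.1 (pvRootA F p.1 lA) lB) := by
    simp only [pvStepB, pvFind, pvFindLoop_eq_rootA, hra, hrb]
  by_cases hC : pvRootA F p.1 lA = pvRootA F p.2 lA
  · rw [hstepA, hstepB, if_neg (by simpa using hC), if_neg (by simpa using hC)]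
    refine ⟨rfl, by rw [hlen, ← hlenB1, ← hlenB2], hgA, hgB2, ⟨dA, hdA, ?_⟩,
      ⟨dB2, hdB2, ?_⟩, ?_⟩
    · intro i h0 h1; exact le_trans (hbA i h0 h1) (by omega)
    · intro i h0 h1; exact le_trans (hbB2 i h0 h1) (by omega)
    · intro j ρ h0 h1; exact hEq2 j ρ h0 h1
  · rw [hstepA, hstepB, if_pos (by simpa using hC), if_pos (by simpa using hC)]
    obtain ⟨hlenA', hgA', ⟨dA', hdA', hdA'le⟩, hiffA'⟩ :=
      pvUnion_spec hgA hdA h0rng.1 h0rng.2 h1rng.1 h1rng.2 hroot0 hroot1 hC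
    obtain ⟨hlenB', hgB', ⟨dB', hdB', hdB'le⟩, hiffB'⟩ :=
      pvUnion_spec hgB2 hdB2 h0rng.1 (by rw [hclB2]; exact h0rng.2)
        h1rng.1 (by rw [hclB2]; exact h1rng.2) hroot0B2 hroot1B2 hC
    refine ⟨hlenA', by rw [hlenA', hlenB', hlenB2, hlenB1, hlen], hgA', hgB', ⟨dA', hdA', ?_⟩,
      ⟨dB', hdB', ?_⟩, ?_⟩
    · intro i h0 h1
      rw [hlenA'] at h1
      exact le_trans (hdA'le i h0 h1) (by have := hbA i h0 h1; omega)
    · intro i h0 h1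
      rw [hlenB', hlenB2] at h1
      refine le_trans (hdB'le i h0 (by rw [hlenB2]; exact h1)) ?_
      have := hbB2 i h0 (by rw [hlenB2]; exact h1)
      omega
    · intro j ρ h0 h1
      rw [hlenA'] at h1
      refine (hiffA' j ρ h0 h1).trans ?_
      refine Iff.trans ?_ (Iff.symm (hiffB' j ρ h0 (by rw [hclB2]; exact h1)))
      constructor
      · rintro (⟨h2, h3⟩ | ⟨h2, h3⟩)
        · exact Or.inl ⟨(hEq2 j _ h0 h1).1 h2, h3⟩
        · exact Or.inr ⟨(hEq2 j ρ h0 h1).1 h2, h3⟩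
      · rintro (⟨h2, h3⟩ | ⟨h2, h3⟩)
        · exact Or.inl ⟨(hEq2 j _ h0 h1).2 h2, h3⟩
        · exact Or.inr ⟨(hEq2 j ρ h0 h1).2 h2, h3⟩

-- the whole pair loop preserves the invariant, one union per pair at most
theorem pvLoop_spec (F : Nat) (ps : List (Int × Int)) : ∀ (k : Nat) (lA lB : List Int),
    pvInv k lA lB →
    (∀ q ∈ ps, -(lA.length : Int) ≤ q.1 ∧ q.1 < (lA.length : Int) ∧
      -(lA.length : Int) ≤ q.2 ∧ q.2 < (lA.length : Int)) →
    k + ps.length + 1 ≤ F →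
    (ps.foldl (pvStepA F) lA).length = lA.length ∧
    pvInv (k + ps.length) (ps.foldl (pvStepA F) lA) (ps.foldl (pvStepB F) lB) := by
  induction ps with
  | nil => intro k lA lB hInv _ _; simpa using hInv
  | cons q ps ih =>
    intro k lA lB hInv hq hf
    have hqh := hq q (by simp)
    obtain ⟨hlenA, hInv'⟩ :=
      pvStep_spec F k lA lB q hInv hqh.1 hqh.2.1 hqh.2.2.1 hqh.2.2.2
        (by simp only [List.length_cons] at hf; omega)
    simp only [List.foldl_cons]
    obtain ⟨h1, h2⟩ := ih (k + 1) (pvStepA F lA q) (pvStepB F lB q) hInv'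
      (by
        intro r hr
        rw [hlenA]
        exact hq r (by simp [hr]))
      (by simp only [List.length_cons] at hf; omega)
    refine ⟨h1.trans hlenA, ?_⟩
    have hk : k + (q :: ps).length = k + 1 + ps.length := by
      simp only [List.length_cons]; omega
    rw [hk]
    exact h2

-- the output pass of B: each find returns A's root and keeps the invariant
theorem pvFinal_spec (F K : Nat) (lA : List Int) (js : List Int) : ∀ (acc lB : List Int),
    pvInv K lA lB → (∀ j ∈ js, 0 ≤ j ∧ j < (lA.length : Int)) → K + 1 ≤ F →
    (js.foldl (pvOutB F) (acc, lB)).1 = acc ++ js.map (fun j => pvRootA F j lA) := by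
  induction js with
  | nil => intro acc lB _ _ _; simp
  | cons j js ih =>
    intro acc lB hInv hjs hf
    obtain ⟨hlen, hgA, hgB, ⟨dA, hdA, hbA⟩, ⟨dB, hdB, hbB⟩, hEq⟩ := hInv
    have hj := hjs j (by simp)
    have hcl : ((lB.length : Int)) = (lA.length : Int) := by rw [hlen]
    have hrB : pvReach lB j (pvRootA F j lB) :=
      pvRootA_spec hgB hdB hj.1 (by rw [hcl]; exact hj.2)
        (by have := hbB j hj.1 (by rw [hcl]; exact hj.2); omega)
    have hrA : pvReach lA j (pvRootA F j lA) :=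
      pvRootA_spec hgA hdA hj.1 hj.2 (by have := hbA j hj.1 hj.2; omega)
    have hroots : pvRootA F j lB = pvRootA F j lA :=
      pvReach_det ((hEq j _ hj.1 hj.2).2 hrB) hrA
    rw [hroots] at hrB
    obtain ⟨hlenB', hgB', ⟨dB', hdB', hdB'le⟩, hiffB'⟩ :=
      pvCompress_spec F lB dB j (pvRootA F j lA) hgB hdB hj.1 (by rw [hcl]; exact hj.2) hrB
        (by have := hbB j hj.1 (by rw [hcl]; exact hj.2); omega)
    have hInv' : pvInv K lA (pvCompress F j (pvRootA F j lA) lB) := by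
      refine ⟨by rw [hlen, hlenB'], hgA, hgB', ⟨dA, hdA, hbA⟩, ⟨dB', hdB', ?_⟩, ?_⟩
      · intro i h0 h1
        rw [hlenB'] at h1
        exact le_trans (hdB'le i h0 h1) (hbB i h0 h1)
      · intro j' ρ h0 h1
        exact (hEq j' ρ h0 h1).trans (Iff.symm (hiffB' j' ρ h0 (by rw [hcl]; exact h1)))
    simp only [List.foldl_cons, pvOutB, pvFind, pvFindLoop_eq_rootA, hroots]
    rw [ih (acc ++ [pvRootA F j lA]) _ hInv' (fun j' hj' => hjs j' (by simp [hj'])) hf]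
    simp

-- the initial parent array list(range(n))
theorem pvRange0_eq (n : Int) :
    PySem.List.pyRange 0 n 1 = (List.range n.toNat).map (fun k : Nat => (k : Int)) := by
  by_cases hn : 0 < n
  · conv_lhs => rw [show n = ((n.toNat : Nat) : Int) by omega]
    exact PySem.List.pyRange_zero_natCast n.toNat
  · have h0 : n.toNat = 0 := by omega
    rw [h0]
    simp only [List.range_zero, List.map_nil]
    simp only [PySem.List.pyRange]
    have : ¬ (0 : Int) < n := hn
    norm_num [this]

theorem pvInit_get (n : Int) : ∀ i : Int, 0 ≤ i →
    i < ((PySem.List.pyRange 0 n 1).length : Int) → pvGetI (PySem.List.pyRange 0 n 1) i = i := by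
  intro i h0 h1
  rw [pvRange0_eq] at h1 ⊢
  rw [pvGetI, PySem.List.pyGetD_eq_getElem _ _ h0 h1]
  simp only [List.length_map, List.length_range] at h1
  simp only [List.getElem_map, List.getElem_range]
  omega

theorem pvInit_good (n : Int) : pvGood (PySem.List.pyRange 0 n 1) := by
  intro x hx
  rw [pvRange0_eq] at hx ⊢
  simp only [List.mem_map, List.mem_range] at hx
  obtain ⟨k, hk, rfl⟩ := hx
  simp only [List.length_map, List.length_range]
  omega

theorem pvInit_dist (n : Int) : pvDistFn (PySem.List.pyRange 0 n 1) (fun _ => 0) := by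
  intro i h0 h1
  exact ⟨fun _ => rfl, fun hne => absurd (pvInit_get n i h0 h1) hne⟩

-- A's output pass: the root of the stored parent is the root of the index
theorem pvMapA_spec (F K : Nat) (l : List Int) (d : Int → Nat)
    (hg : pvGood l) (hd : pvDistFn l d)
    (hb : ∀ i : Int, 0 ≤ i → i < (l.length : Int) → d i ≤ K) (hf : K + 1 ≤ F) :
    l.map (fun v => pvRootA F v l) =
      (List.range l.length).map (fun i => pvRootA F ((i : Nat) : Int) l) := by
  apply List.ext_getElem (by simp)
  intro i h1 h2
  simp only [List.getElem_map, List.getElem_range]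
  have hiR : ((i : Nat) : Int) < (l.length : Int) := by
    simp only [List.length_map] at h1; omega
  have hv : pvGetI l ((i : Nat) : Int) = l[i] := by
    rw [pvGetI, PySem.List.pyGetD_eq_getElem _ _ (by omega) hiR]
    congr 1
  have hvr : 0 ≤ l[i] ∧ l[i] < (l.length : Int) := hg _ (List.getElem_mem _)
  have h1r : pvReach l (l[i]) (pvRootA F (l[i]) l) :=
    pvRootA_spec hg hd hvr.1 hvr.2 (by have := hb _ hvr.1 hvr.2; omega)
  have h2r : pvReach l ((i : Nat) : Int) (pvRootA F ((i : Nat) : Int) l) :=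
    pvRootA_spec hg hd (by omega) hiR (by have := hb ((i : Nat) : Int) (by omega) hiR; omega)
  by_cases hroot : pvGetI l ((i : Nat) : Int) = ((i : Nat) : Int)
  · rw [← hv, hroot]
  · have hlink : pvReach l ((i : Nat) : Int) (pvRootA F (l[i]) l) :=
      pvReach.step _ _ hroot (by rw [hv]; exact h1r)
    exact pvReach_det hlink h2r

-- ===== VERDICT (by name: the statement is the Claim_ definition above) =====
theorem quick_union_spec : Claim_equal_quick_union := by
  intro n pairs _hDom hPre
  show quick_union n pairs = quick_union_alt n pairs
  simp only [quick_union, quick_union_alt]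
  have hg0 := pvInit_good n
  have hd0 := pvInit_dist n
  have hlen0 : (PySem.List.pyRange 0 n 1).length = n.toNat := by
    rw [pvRange0_eq]; simp
  have hInv0 : pvInv 0 (PySem.List.pyRange 0 n 1) (PySem.List.pyRange 0 n 1) :=
    ⟨rfl, hg0, hg0, ⟨fun _ => 0, hd0, fun _ _ _ => le_refl 0⟩,
      ⟨fun _ => 0, hd0, fun _ _ _ => le_refl 0⟩, fun _ _ _ _ => Iff.rfl⟩
  have hpair : ∀ q ∈ pairs,
      -(((PySem.List.pyRange 0 n 1).length : Nat) : Int) ≤ q.1 ∧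
      q.1 < (((PySem.List.pyRange 0 n 1).length : Nat) : Int) ∧
      -(((PySem.List.pyRange 0 n 1).length : Nat) : Int) ≤ q.2 ∧
      q.2 < (((PySem.List.pyRange 0 n 1).length : Nat) : Int) := by
    intro q hq
    obtain ⟨⟨h1, h2⟩, h3, h4⟩ := hPre q hq
    rw [hlen0]
    exact ⟨by omega, by omega, by omega, by omega⟩
  obtain ⟨hlenA, hInvK⟩ := pvLoop_spec (pairs.length + 1) pairs 0 _ _ hInv0 hpair (by omega)
  rw [Nat.zero_add] at hInvK
  have hInvK2 := hInvK
  obtain ⟨hlenEq, hgA, _, ⟨dA, hdA, hbA⟩, _, _⟩ := hInvK2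
  have hbnd : ∀ j ∈ PySem.List.pyRange 0 n 1, 0 ≤ j ∧
      j < ((pairs.foldl (pvStepA (pairs.length + 1)) (PySem.List.pyRange 0 n 1)).length : Int) := by
    intro j hj
    rw [pvRange0_eq] at hj
    simp only [List.mem_map, List.mem_range] at hj
    obtain ⟨k, hk, rfl⟩ := hj
    rw [hlenA, hlen0]
    exact ⟨by omega, by omega⟩
  rw [pvFinal_spec (pairs.length + 1) pairs.length _ (PySem.List.pyRange 0 n 1) [] _ hInvK hbnd
    (by omega)]
  rw [pvMapA_spec (pairs.length + 1) pairs.length _ dA hgA hdA hbA (by omega)]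
  rw [List.nil_append]
  simp only [pvRange0_eq] at hlenA ⊢
  rw [List.map_map, hlenA]
  simp only [List.length_map, List.length_range]
  rfl
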